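-- pv_equiv track=rewrite | github.com/ye-9e623/python-projects | intro_algos/src/sorts.py | find_max_indx
-- ===== SOURCE A (Python) =====
-- def find_max_indx(data: list, indx) -> int:
--     ''' get maximum
--     Arguments:
--     Returns: '''
--     max_indx = 0
--     max_val = data[max_indx]
--     for i, val in enumerate(data[1:indx], start=1):
--         if data[i] > max_val:
--             max_indx = i
--             max_val = data[max_indx]
--     return max_indx
-- ===== SOURCE B (Python) =====
-- def find_max_indx(data: list, indx) -> int:
--     ''' get maximum
--     Arguments:
--     Returns: '''
--     cand = [data[0]] + data[1:indx]
--     return cand.index(max(cand))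
-- ===== Notes on version B (the rewrite author's own statement) =====
-- stated objective: idiomatic
-- what changed: Replaced the fused loop that tracks (max_indx, max_val) together with a two-pass builtin form: build the candidate prefix [data[0]] + data[1:indx], take max() in one pass and locate its first occurrence with .index() in a second.
import Mathlib
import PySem

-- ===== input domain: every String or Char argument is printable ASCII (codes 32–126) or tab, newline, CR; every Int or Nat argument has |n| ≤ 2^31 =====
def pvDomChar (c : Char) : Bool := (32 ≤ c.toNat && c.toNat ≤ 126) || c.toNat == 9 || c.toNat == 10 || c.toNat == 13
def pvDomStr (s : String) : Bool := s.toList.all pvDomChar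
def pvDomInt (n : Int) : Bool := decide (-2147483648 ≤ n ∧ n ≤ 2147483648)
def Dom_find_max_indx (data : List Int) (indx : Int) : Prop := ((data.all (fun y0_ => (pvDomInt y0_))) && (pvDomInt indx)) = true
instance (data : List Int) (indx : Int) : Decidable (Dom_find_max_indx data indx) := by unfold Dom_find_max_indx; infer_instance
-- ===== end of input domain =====

-- B replaces A's fused max-value/max-index loop by the idiomatic two-pass form
-- cand = [data[0]] + data[1:indx]; cand.index(max(cand)).

-- ===== PORT A =====
def find_max_indx (data : List Int) (indx : Int) : Int :=
  -- max_indx = 0; max_val = data[max_indx]; loop over enumerate(data[1:indx], start=1)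
  let init : Int × Int := (0, PySem.List.pyGetD data 0 0)
  let r :=
    (PySem.List.enumerate (PySem.List.slice data (some 1) (some indx)) 1).foldl
      (fun st iv =>
        if PySem.List.pyGetD data iv.1 0 > st.2 then (iv.1, PySem.List.pyGetD data iv.1 0)
        else st) init
  r.1

-- ===== PORT B =====
def find_max_indx_alt (data : List Int) (indx : Int) : Int :=
  let cand : List Int := PySem.List.pyGetD data 0 0 :: PySem.List.slice data (some 1) (some indx)
  match PySem.List.max? cand (fun y => y) with
  | none => 0
  | some m =>
    match PySem.List.index? cand m with
    | none => 0
    | some k => (k : Int)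

-- ===== PRECONDITION & SPEC =====
-- Pre_ excludes only the empty list, on which A's 'data[0]' raises IndexError (B raises too).
def Pre_find_max_indx (data : List Int) (indx : Int) : Prop := data ≠ []
instance (data : List Int) (indx : Int) : Decidable (Pre_find_max_indx data indx) := by unfold Pre_find_max_indx; infer_instance
def pvWitness_find_max_indx : List Int × Int := ([3, 1, 4, 1, 5], 4)

def Spec_find_max_indx (data : List Int) (indx : Int) (out : Int) : Prop := out = find_max_indx_alt data indx
instance (data : List Int) (indx : Int) (out : Int) : Decidable (Spec_find_max_indx data indx out) := by unfold Spec_find_max_indx; infer_instance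

-- ===== CLAIM (what is proved, stated in full; the proofs are below) =====
def Claim_equal_find_max_indx : Prop := ∀ (data : List Int) (indx : Int), Dom_find_max_indx data indx → Pre_find_max_indx data indx → Spec_find_max_indx data indx (find_max_indx data indx)

-- ===== LEMMAS AND PROOFS =====

-- value of max(cand) (cand nonempty, so total with default 0)
def pvMv (p : List Int) : Int := (PySem.List.max? p (fun y => y)).getD 0
-- first index of max(cand)
def pvFmi (p : List Int) : Int := ((PySem.List.index? p (pvMv p)).getD 0 : Nat)

theorem pvMv_cons (a : Int) (t : List Int) : pvMv (a :: t) = t.foldl max a := by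
  simp [pvMv, PySem.List.max?_id_cons]

theorem pvMv_append_singleton (p : List Int) (hp : p ≠ []) (x : Int) :
    pvMv (p ++ [x]) = max (pvMv p) x := by
  obtain ⟨a, t, rfl⟩ := List.exists_cons_of_ne_nil hp
  rw [List.cons_append, pvMv_cons, pvMv_cons, List.foldl_append]
  simp

theorem pvMv_isMax (p : List Int) (hp : p ≠ []) : ∀ y ∈ p, y ≤ pvMv p := by
  obtain ⟨a, t, rfl⟩ := List.exists_cons_of_ne_nil hp
  have h := PySem.List.max?_id_cons a t
  intro y hy
  have := PySem.List.max?_isMax (key := fun y => y) h y hy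
  simpa [pvMv_cons] using this

theorem pvMv_mem (p : List Int) (hp : p ≠ []) : pvMv p ∈ p := by
  obtain ⟨a, t, rfl⟩ := List.exists_cons_of_ne_nil hp
  exact PySem.List.max?_mem (by rw [pvMv_cons]; exact PySem.List.max?_id_cons a t)

theorem pvLoop_inv (s : List Int) : ∀ (p : List Int), p ≠ [] →
    (PySem.List.enumerate s (p.length)).foldl
      (fun (st : Int × Int) (iv : Int × Int) => if iv.2 > st.2 then (iv.1, iv.2) else st)
      (pvFmi p, pvMv p) = (pvFmi (p ++ s), pvMv (p ++ s)) := by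
  induction s with
  | nil => intro p hp; simp [PySem.List.enumerate]
  | cons x s ih =>
    intro p hp
    rw [PySem.List.enumerate_cons, List.foldl_cons]
    have hstep : (if ((p.length : Int), x).2 > (pvFmi p, pvMv p).2
          then (((p.length : Int), x).1, ((p.length : Int), x).2) else (pvFmi p, pvMv p))
        = (pvFmi (p ++ [x]), pvMv (p ++ [x])) := by
      show (if x > pvMv p then ((p.length : Int), x) else (pvFmi p, pvMv p))
          = (pvFmi (p ++ [x]), pvMv (p ++ [x]))
      by_cases h : x > pvMv p
      · have hnot : x ∉ p := fun hx => absurd (pvMv_isMax p hp x hx) (by omega)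
        have hidx : PySem.List.index? (p ++ [x]) x = some p.length :=
          PySem.List.index?_append_singleton_self p x hnot
        have hmv : pvMv (p ++ [x]) = x := by
          rw [pvMv_append_singleton p hp x]; omega
        rw [if_pos h]
        unfold pvFmi
        rw [hmv, hidx]
        rfl
      · have hmv : pvMv (p ++ [x]) = pvMv p := by
          rw [pvMv_append_singleton p hp x]; omega
        have hidx : PySem.List.index? (p ++ [x]) (pvMv p) =
            PySem.List.index? p (pvMv p) :=
          PySem.List.index?_append_of_mem [x] (pvMv_mem p hp)
        rw [if_neg h]
        unfold pvFmi
        rw [hmv, hidx]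
    rw [hstep]
    have hlen : (p.length : Int) + 1 = ((p ++ [x]).length : Int) := by
      simp
    rw [hlen, ih (p ++ [x]) (by simp)]
    simp

theorem pvMem_enumerate {α : Type} (xs : List α) (st : Int) {i : Int} {v : α}
    (h : (i, v) ∈ PySem.List.enumerate xs st) :
    ∃ j : Nat, i = st + j ∧ xs[j]? = some v := by
  induction xs generalizing st with
  | nil => simp [PySem.List.enumerate] at h
  | cons x t ih =>
    rw [PySem.List.enumerate_cons] at h
    rcases List.mem_cons.mp h with h1 | h2
    · injection h1 with hi hv
      subst hi; subst hv
      exact ⟨0, by simp, by simp⟩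
    · obtain ⟨j, hj1, hj2⟩ := ih (st + 1) h2
      exact ⟨j + 1, by push_cast; omega, by simpa using hj2⟩

theorem find_max_indx_spec : Claim_equal_find_max_indx := by
  intro data indx _ hpre
  unfold Spec_find_max_indx
  obtain ⟨d0, rest, rfl⟩ := List.exists_cons_of_ne_nil hpre
  set s := PySem.List.slice (d0 :: rest) (some 1) (some indx) with hs
  -- the slice is a sublist of the tail at aligned positions
  have hsj : ∀ j : Nat, ∀ v : Int, s[j]? = some v → (d0 :: rest)[j + 1]? = some v := by
    intro j v hv
    have h1 : PySem.List.clampIdx (d0 :: rest).length 1 = 1 := by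
      have := PySem.List.clampIdx_natCast (d0 :: rest).length 1
      simp at this ⊢
    rw [hs] at hv
    simp only [PySem.List.slice, h1] at hv
    rw [List.getElem?_take] at hv
    split at hv
    · simpa using hv
    · simp at hv
  -- A's loop compares via data[i]; replace by the enumerated value
  have hcongr :
      (PySem.List.enumerate s 1).foldl
        (fun (st : Int × Int) iv =>
          if PySem.List.pyGetD (d0 :: rest) iv.1 0 > st.2
          then (iv.1, PySem.List.pyGetD (d0 :: rest) iv.1 0) else st)
        (0, PySem.List.pyGetD (d0 :: rest) 0 0)
      = (PySem.List.enumerate s 1).foldl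
        (fun (st : Int × Int) (iv : Int × Int) => if iv.2 > st.2 then (iv.1, iv.2) else st)
        (0, PySem.List.pyGetD (d0 :: rest) 0 0) := by
    apply PySem.List.foldl_congr_mem
    intro acc iv hiv
    obtain ⟨j, hj1, hj2⟩ := pvMem_enumerate s 1 (i := iv.1) (v := iv.2) (by simpa using hiv)
    have hget : PySem.List.pyGetD (d0 :: rest) iv.1 0 = iv.2 := by
      have : iv.1 = ((j + 1 : Nat) : Int) := by push_cast; omega
      rw [this, PySem.List.pyGetD_natCast]
      have := hsj j iv.2 hj2
      simp [List.getD, this]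
    rw [hget]
  have hinit : ((0 : Int), PySem.List.pyGetD (d0 :: rest) 0 0) = (pvFmi [d0], pvMv [d0]) := by
    simp [pvFmi, pvMv, PySem.List.pyGetD_zero_cons, PySem.List.max?, PySem.List.index?]
  have hloop := pvLoop_inv s [d0] (by simp)
  -- compute both sides
  show (let init : Int × Int := (0, PySem.List.pyGetD (d0 :: rest) 0 0);
        ((PySem.List.enumerate s 1).foldl
          (fun st iv =>
            if PySem.List.pyGetD (d0 :: rest) iv.1 0 > st.2
            then (iv.1, PySem.List.pyGetD (d0 :: rest) iv.1 0) else st) init).1)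
      = find_max_indx_alt (d0 :: rest) indx
  rw [show (PySem.List.pyGetD (d0 :: rest) 0 0) = d0 from PySem.List.pyGetD_zero_cons d0 rest 0] at *
  have hA : ((PySem.List.enumerate s 1).foldl
        (fun (st : Int × Int) iv =>
          if PySem.List.pyGetD (d0 :: rest) iv.1 0 > st.2
          then (iv.1, PySem.List.pyGetD (d0 :: rest) iv.1 0) else st) (0, d0)).1
      = pvFmi (d0 :: s) := by
    rw [hcongr, hinit]
    rw [show (1 : Int) = ((List.length [d0] : Int)) by simp] 
    rw [hloop]
    simp
  have hB : find_max_indx_alt (d0 :: rest) indx = pvFmi (d0 :: s) := by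
    have hd : PySem.List.pyGetD (d0 :: rest) 0 0 = d0 := PySem.List.pyGetD_zero_cons d0 rest 0
    have hmax : PySem.List.max? (d0 :: s) (fun y => y) = some (pvMv (d0 :: s)) := by
      rw [pvMv_cons]; exact PySem.List.max?_id_cons d0 s
    have hmem : pvMv (d0 :: s) ∈ d0 :: s := pvMv_mem _ (by simp)
    obtain ⟨k, hk⟩ := Option.isSome_iff_exists.mp
      ((PySem.List.index?_isSome_iff (d0 :: s) (pvMv (d0 :: s))).mpr hmem)
    simp only [find_max_indx_alt, hd, ← hs, hmax, hk]
    rw [PySem.List.index?_eq_idxOf?] at hk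
    simp [pvFmi, hk]
  rw [hA] at *
  exact hB.symm
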